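-- pv_equiv track=rewrite | github.com/Shai1436/nlcli | nlcli/pipeline/command_filter.py | _enhance_command_with_context
-- ===== SOURCE A (Python) =====
-- from typing import Dict, List, Optional, Any
--
-- def _enhance_command_with_context(base_cmd: str, args: list, context: Optional[Dict] = None) -> str:
--     """Enhance commands with intelligent context-aware parameters"""
--
--     # Context-aware find enhancements
--     if base_cmd == 'find' and args:
--         if any(word in ' '.join(args) for word in ['python', 'py']):
--             if 'log' in ' '.join(args):
--                 return 'find . -name "*.log" -o -name "*.out" -o -name "*.err"'
--             else:
--                 return 'find . -name "*.py"'
--         elif any(word in ' '.join(args) for word in ['log', 'logs']):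
--             if context and context.get('project_type') == 'python':
--                 return 'find . -name "*.log" -o -name "*.out" -o -name "*.err"'
--             else:
--                 return 'find . -name "*.log"'
--         elif any(word in ' '.join(args) for word in ['javascript', 'js']):
--             return 'find . -name "*.js"'
--         elif any(word in ' '.join(args) for word in ['text', 'txt']):
--             return 'find . -name "*.txt"'
--         elif any(word in ' '.join(args) for word in ['config', 'configuration']):
--             return 'find . -name "*.conf" -o -name "*.config" -o -name "*.cfg"'
--         elif any(word in ' '.join(args) for word in ['large', 'big']):
--             return 'find . -size +100M -type f'
--         elif any(word in ' '.join(args) for word in ['recent', 'new']):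
--             return 'find . -mtime -7 -type f'
--
--     # Git command enhancements
--     if base_cmd == 'git' and args:
--         if 'status' in args:
--             return 'git status --short' if len(' '.join(args).split()) <= 2 else 'git status'
--         elif 'log' in args or 'history' in args:
--             return 'git log --oneline'
--         elif 'diff' in args:
--             return 'git diff'
--
--     # Process command enhancements
--     if base_cmd == 'ps' and args:
--         if any(word in ' '.join(args) for word in ['memory', 'mem']):
--             return 'ps aux --sort=-%mem | head -20'
--         elif any(word in ' '.join(args) for word in ['cpu']):
--             return 'ps aux --sort=-%cpu | head -20'
--         else:
--             return 'ps aux'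
--
--     # Default: return original command
--     return f"{base_cmd} {' '.join(args)}".strip()
-- ===== SOURCE B (Python) =====
-- _FIND_LOG3 = 'find . -name "*.log" -o -name "*.out" -o -name "*.err"'
--
-- # flat keyword -> priority maps; lower priority wins (matches A's cascade order)
-- _FIND_PRIO = [('python', 0), ('py', 0), ('log', 1), ('logs', 1),
--               ('javascript', 2), ('js', 2), ('text', 3), ('txt', 3),
--               ('config', 4), ('configuration', 4), ('large', 5), ('big', 5),
--               ('recent', 6), ('new', 6)]
-- _FIND_OUT = {2: 'find . -name "*.js"', 3: 'find . -name "*.txt"',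
--              4: 'find . -name "*.conf" -o -name "*.config" -o -name "*.cfg"',
--              5: 'find . -size +100M -type f', 6: 'find . -mtime -7 -type f'}
--
-- _GIT_PRIO = [('status', 0), ('log', 1), ('history', 1), ('diff', 2)]
-- _GIT_OUT = {1: 'git log --oneline', 2: 'git diff'}
--
-- _PS_PRIO = [('memory', 0), ('mem', 0), ('cpu', 1)]
-- _PS_OUT = {0: 'ps aux --sort=-%mem | head -20', 1: 'ps aux --sort=-%cpu | head -20'}
--
--
-- def _enhance_command_with_context(base_cmd, args, context=None):
--     joined = ' '.join(args)
--     if args: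
--         if base_cmd == 'find':
--             hit = min((p for w, p in _FIND_PRIO if w in joined), default=None)
--             if hit == 0:
--                 return _FIND_LOG3 if 'log' in joined else 'find . -name "*.py"'
--             if hit == 1:
--                 if context and context.get('project_type') == 'python':
--                     return _FIND_LOG3
--                 return 'find . -name "*.log"'
--             if hit is not None:
--                 return _FIND_OUT[hit]
--         elif base_cmd == 'git':
--             hit = min((p for k, p in _GIT_PRIO if k in args), default=None)
--             if hit == 0:
--                 return 'git status --short' if len(joined.split()) <= 2 else 'git status'
--             if hit is not None:
--                 return _GIT_OUT[hit]
--         elif base_cmd == 'ps':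
--             hit = min((p for w, p in _PS_PRIO if w in joined), default=None)
--             return 'ps aux' if hit is None else _PS_OUT[hit]
--     return (base_cmd + ' ' + joined).strip()
-- ===== Notes on version B (the rewrite author's own statement) =====
-- stated objective: alternative
-- what changed: Replaces A's short-circuit if/elif cascade by a priority computation: a flat keyword-to-priority map per command, B collects ALL matching keywords' priorities (substring for find/ps, list membership for git), takes the minimum priority and renders the result from that number; first-match order is recovered arithmetically because group priorities are listed nondecreasing.
import Mathlib
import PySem

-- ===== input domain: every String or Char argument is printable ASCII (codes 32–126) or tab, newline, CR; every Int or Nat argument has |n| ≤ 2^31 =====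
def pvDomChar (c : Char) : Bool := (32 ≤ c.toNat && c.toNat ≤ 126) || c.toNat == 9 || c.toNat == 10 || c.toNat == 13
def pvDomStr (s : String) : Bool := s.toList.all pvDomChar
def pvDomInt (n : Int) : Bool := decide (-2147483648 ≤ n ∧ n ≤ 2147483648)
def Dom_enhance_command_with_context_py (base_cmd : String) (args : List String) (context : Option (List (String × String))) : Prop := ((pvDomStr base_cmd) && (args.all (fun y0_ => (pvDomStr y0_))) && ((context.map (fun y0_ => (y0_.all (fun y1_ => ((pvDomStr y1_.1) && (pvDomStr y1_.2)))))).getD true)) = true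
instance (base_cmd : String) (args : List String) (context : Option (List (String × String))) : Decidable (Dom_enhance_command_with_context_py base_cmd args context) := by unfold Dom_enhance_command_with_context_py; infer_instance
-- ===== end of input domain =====

-- B replaces A's short-circuit if/elif cascade by a flat keyword→priority map per command: it collects ALL matching priorities, takes the minimum, and renders from that number (objective: alternative decomposition, same cost).


-- ===== PORT A =====
-- truthy non-empty dict with d.get('project_type') == 'python'
def pvCtxPythonA (context : Option (List (String × String))) : Bool :=
  match context with
  | none => false
  | some d => !d.isEmpty && ((PySem.Dict.ofList d).get? "project_type" == some "python")

-- literal transliteration of A; the three base_cmd blocks are mutually exclusive, so the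
-- Python fall-through to the final return is written as the trailing else of each block
def enhance_command_with_context_py (base_cmd : String) (args : List String) (context : Option (List (String × String))) : String :=
  if base_cmd == "find" && !args.isEmpty then
    if PySem.Str.isIn "python" (PySem.Str.join " " args) || PySem.Str.isIn "py" (PySem.Str.join " " args) then
      if PySem.Str.isIn "log" (PySem.Str.join " " args) then
        "find . -name \"*.log\" -o -name \"*.out\" -o -name \"*.err\""
      else
        "find . -name \"*.py\""
    else if PySem.Str.isIn "log" (PySem.Str.join " " args) || PySem.Str.isIn "logs" (PySem.Str.join " " args) then
      if pvCtxPythonA context then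
        "find . -name \"*.log\" -o -name \"*.out\" -o -name \"*.err\""
      else
        "find . -name \"*.log\""
    else if PySem.Str.isIn "javascript" (PySem.Str.join " " args) || PySem.Str.isIn "js" (PySem.Str.join " " args) then
      "find . -name \"*.js\""
    else if PySem.Str.isIn "text" (PySem.Str.join " " args) || PySem.Str.isIn "txt" (PySem.Str.join " " args) then
      "find . -name \"*.txt\""
    else if PySem.Str.isIn "config" (PySem.Str.join " " args) || PySem.Str.isIn "configuration" (PySem.Str.join " " args) then
      "find . -name \"*.conf\" -o -name \"*.config\" -o -name \"*.cfg\""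
    else if PySem.Str.isIn "large" (PySem.Str.join " " args) || PySem.Str.isIn "big" (PySem.Str.join " " args) then
      "find . -size +100M -type f"
    else if PySem.Str.isIn "recent" (PySem.Str.join " " args) || PySem.Str.isIn "new" (PySem.Str.join " " args) then
      "find . -mtime -7 -type f"
    else
      PySem.Str.strip (PySem.Str.join " " [base_cmd, PySem.Str.join " " args])
  else if base_cmd == "git" && !args.isEmpty then
    if args.contains "status" then
      if (PySem.Str.split₀ (PySem.Str.join " " args)).length <= 2 then "git status --short" else "git status"
    else if args.contains "log" || args.contains "history" then
      "git log --oneline"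
    else if args.contains "diff" then
      "git diff"
    else
      PySem.Str.strip (PySem.Str.join " " [base_cmd, PySem.Str.join " " args])
  else if base_cmd == "ps" && !args.isEmpty then
    if PySem.Str.isIn "memory" (PySem.Str.join " " args) || PySem.Str.isIn "mem" (PySem.Str.join " " args) then
      "ps aux --sort=-%mem | head -20"
    else if PySem.Str.isIn "cpu" (PySem.Str.join " " args) then
      "ps aux --sort=-%cpu | head -20"
    else
      "ps aux"
  else
    PySem.Str.strip (PySem.Str.join " " [base_cmd, PySem.Str.join " " args])

-- ===== PORT B =====
-- B: flat keyword→priority lists; min over the priorities of ALL matched keywords picks the rule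
def pvCtxPythonB (context : Option (List (String × String))) : Bool :=
  match context with
  | none => false
  | some d => !d.isEmpty && ((PySem.Dict.ofList d).get? "project_type" == some "python")

def pvFindLog3 : String := "find . -name \"*.log\" -o -name \"*.out\" -o -name \"*.err\""

def pvFindPrio : List (String × Int) :=
  [("python", 0), ("py", 0), ("log", 1), ("logs", 1), ("javascript", 2), ("js", 2),
   ("text", 3), ("txt", 3), ("config", 4), ("configuration", 4), ("large", 5), ("big", 5),
   ("recent", 6), ("new", 6)]
def pvFindOut : List (Int × String) :=
  [(2, "find . -name \"*.js\""), (3, "find . -name \"*.txt\""),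
   (4, "find . -name \"*.conf\" -o -name \"*.config\" -o -name \"*.cfg\""),
   (5, "find . -size +100M -type f"), (6, "find . -mtime -7 -type f")]

def pvGitPrio : List (String × Int) := [("status", 0), ("log", 1), ("history", 1), ("diff", 2)]
def pvGitOut : List (Int × String) := [(1, "git log --oneline"), (2, "git diff")]

def pvPsPrio : List (String × Int) := [("memory", 0), ("mem", 0), ("cpu", 1)]
def pvPsOut : List (Int × String) :=
  [(0, "ps aux --sort=-%mem | head -20"), (1, "ps aux --sort=-%cpu | head -20")]

-- min((p for w, p in prio if hit(w)), default=None)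
def pvMinHit (prio : List (String × Int)) (hit : String → Bool) : Option Int :=
  PySem.List.min? (prio.filterMap (fun p => if hit p.1 then some p.2 else none)) (fun x => x)

-- out[h]; the key is always present on the paths Source B reaches, so getD "" is exact there
def pvOutTab (out : List (Int × String)) (h : Int) : String :=
  ((PySem.Dict.ofList out).get? h).getD ""

def enhance_command_with_context_py_alt (base_cmd : String) (args : List String) (context : Option (List (String × String))) : String :=
  let joined := PySem.Str.join " " args
  let dflt := PySem.Str.strip (PySem.Str.join " " [base_cmd, joined])  -- base_cmd + ' ' + joined
  if !args.isEmpty then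
    if base_cmd == "find" then
      let hit := pvMinHit pvFindPrio (fun w => PySem.Str.isIn w joined)
      if hit == some 0 then
        if PySem.Str.isIn "log" joined then pvFindLog3 else "find . -name \"*.py\""
      else if hit == some 1 then
        if pvCtxPythonB context then pvFindLog3 else "find . -name \"*.log\""
      else
        match hit with
        | some h => pvOutTab pvFindOut h
        | none => dflt
    else if base_cmd == "git" then
      let hit := pvMinHit pvGitPrio (fun k => args.contains k)
      if hit == some 0 then
        if (PySem.Str.split₀ joined).length <= 2 then "git status --short" else "git status"
      else
        match hit with
        | some h => pvOutTab pvGitOut h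
        | none => dflt
    else if base_cmd == "ps" then
      match pvMinHit pvPsPrio (fun w => PySem.Str.isIn w joined) with
      | some h => pvOutTab pvPsOut h
      | none => "ps aux"
    else
      dflt
  else
    dflt

-- ===== PRECONDITION & SPEC =====
def Spec_enhance_command_with_context_py (base_cmd : String) (args : List String) (context : Option (List (String × String))) (out : String) : Prop := out = enhance_command_with_context_py_alt base_cmd args context
instance (base_cmd : String) (args : List String) (context : Option (List (String × String))) (out : String) : Decidable (Spec_enhance_command_with_context_py base_cmd args context out) := by unfold Spec_enhance_command_with_context_py; infer_instance

-- ===== CLAIM =====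
def Claim_equal_enhance_command_with_context_py : Prop := ∀ (base_cmd : String) (args : List String) (context : Option (List (String × String))), Dom_enhance_command_with_context_py base_cmd args context → Spec_enhance_command_with_context_py base_cmd args context (enhance_command_with_context_py base_cmd args context)

-- ===== LEMMAS AND PROOFS =====

theorem foldl_min_of_le (l : List Int) (a : Int) (h : ∀ x ∈ l, a ≤ x) : l.foldl min a = a := by
  induction l with
  | nil => rfl
  | cons x t ih =>
    simp only [List.foldl_cons]
    rw [min_eq_left (h x (by simp))]
    exact ih (fun y hy => h y (by simp [hy]))

-- proof-side cascade: the priority of the first matching keyword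
def firstPrio : List (String × Int) → (String → Bool) → Option Int
  | [], _ => none
  | p :: rest, hit => if hit p.1 then some p.2 else firstPrio rest hit

-- the min of the matched priorities of a nondecreasing priority list is the FIRST match's priority
theorem minHit_eq_find (prio : List (String × Int)) (hit : String → Bool)
    (hs : prio.Pairwise (fun a b => a.2 ≤ b.2)) :
    pvMinHit prio hit = firstPrio prio hit := by
  induction prio with
  | nil => rfl
  | cons p rest ih =>
    rcases List.pairwise_cons.mp hs with ⟨hp, hrest⟩
    by_cases h : hit p.1
    · simp only [pvMinHit, List.filterMap_cons, h, if_pos, firstPrio]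
      rw [PySem.List.min?_id_cons]
      congr 1
      exact foldl_min_of_le _ _ (fun x hx => by
        rcases List.mem_filterMap.mp hx with ⟨q, hq, hqx⟩
        by_cases hh : hit q.1
        · simp [hh] at hqx; exact hqx ▸ hp q hq
        · simp [hh] at hqx)
    · simpa only [pvMinHit, List.filterMap_cons, h, if_neg, firstPrio,
        Bool.false_eq_true, not_false_eq_true] using ih hrest

theorem findHit (hit : String → Bool) :
    pvMinHit pvFindPrio hit = firstPrio pvFindPrio hit :=
  minHit_eq_find _ _ (by decide)

theorem gitHit (hit : String → Bool) :
    pvMinHit pvGitPrio hit = firstPrio pvGitPrio hit :=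
  minHit_eq_find _ _ (by decide)

theorem psHit (hit : String → Bool) :
    pvMinHit pvPsPrio hit = firstPrio pvPsPrio hit :=
  minHit_eq_find _ _ (by decide)

-- ===== VERDICT =====
set_option maxHeartbeats 4000000 in
theorem enhance_command_with_context_py_spec : Claim_equal_enhance_command_with_context_py := by
  intro b a c hdom
  clear hdom
  unfold Spec_enhance_command_with_context_py
  cases a with
  | nil =>
    simp [enhance_command_with_context_py, enhance_command_with_context_py_alt]
  | cons hd tl =>
    simp only [enhance_command_with_context_py, enhance_command_with_context_py_alt,
      List.isEmpty_cons, Bool.not_false, Bool.and_true, eq_self_iff_true, if_true]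
    simp only [findHit, gitHit, psHit]
    simp only [pvFindPrio, pvGitPrio, pvPsPrio, firstPrio, pvCtxPythonA, pvCtxPythonB]
    generalize PySem.Str.join " " (hd :: tl) = j
    by_cases hb : (b == "find") = true
    · simp only [hb, if_true]
      by_cases hf1 : PySem.Chars.isIn ['p', 'y', 't', 'h', 'o', 'n'] j.toList = true
      · simp [hf1] <;> try rfl
      ·
        by_cases hf2 : PySem.Chars.isIn ['p', 'y'] j.toList = true
        · simp [hf1, hf2] <;> try rfl
        ·
          by_cases hf3 : PySem.Chars.isIn ['l', 'o', 'g'] j.toList = true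
          · simp [hf1, hf2, hf3] <;> try rfl
          ·
            by_cases hf4 : PySem.Chars.isIn ['l', 'o', 'g', 's'] j.toList = true
            · simp [hf1, hf2, hf3, hf4] <;> try rfl
            ·
              by_cases hf5 : PySem.Chars.isIn ['j', 'a', 'v', 'a', 's', 'c', 'r', 'i', 'p', 't'] j.toList = true
              · simp [hf1, hf2, hf3, hf4, hf5] <;> try rfl
              ·
                by_cases hf6 : PySem.Chars.isIn ['j', 's'] j.toList = true
                · simp [hf1, hf2, hf3, hf4, hf5, hf6] <;> try rfl
                ·
                  by_cases hf7 : PySem.Chars.isIn ['t', 'e', 'x', 't'] j.toList = true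
                  · simp [hf1, hf2, hf3, hf4, hf5, hf6, hf7] <;> try rfl
                  ·
                    by_cases hf8 : PySem.Chars.isIn ['t', 'x', 't'] j.toList = true
                    · simp [hf1, hf2, hf3, hf4, hf5, hf6, hf7, hf8] <;> try rfl
                    ·
                      by_cases hf9 : PySem.Chars.isIn ['c', 'o', 'n', 'f', 'i', 'g'] j.toList = true
                      · simp [hf1, hf2, hf3, hf4, hf5, hf6, hf7, hf8, hf9] <;> try rfl
                      ·
                        by_cases hf10 : PySem.Chars.isIn ['c', 'o', 'n', 'f', 'i', 'g', 'u', 'r', 'a', 't', 'i', 'o', 'n'] j.toList = true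
                        · simp [hf1, hf2, hf3, hf4, hf5, hf6, hf7, hf8, hf9, hf10] <;> try rfl
                        ·
                          by_cases hf11 : PySem.Chars.isIn ['l', 'a', 'r', 'g', 'e'] j.toList = true
                          · simp [hf1, hf2, hf3, hf4, hf5, hf6, hf7, hf8, hf9, hf10, hf11] <;> try rfl
                          ·
                            by_cases hf12 : PySem.Chars.isIn ['b', 'i', 'g'] j.toList = true
                            · simp [hf1, hf2, hf3, hf4, hf5, hf6, hf7, hf8, hf9, hf10, hf11, hf12] <;> try rfl
                            ·
                              by_cases hf13 : PySem.Chars.isIn ['r', 'e', 'c', 'e', 'n', 't'] j.toList = true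
                              · simp [hf1, hf2, hf3, hf4, hf5, hf6, hf7, hf8, hf9, hf10, hf11, hf12, hf13] <;> try rfl
                              ·
                                by_cases hf14 : PySem.Chars.isIn ['n', 'e', 'w'] j.toList = true
                                · simp [hf1, hf2, hf3, hf4, hf5, hf6, hf7, hf8, hf9, hf10, hf11, hf12, hf13, hf14] <;> try rfl
                                · simp [hf1, hf2, hf3, hf4, hf5, hf6, hf7, hf8, hf9, hf10, hf11, hf12, hf13, hf14] <;> try rfl
    · by_cases hg : (b == "git") = true
      · simp only [hb, hg, Bool.false_eq_true, if_false, if_true]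
        by_cases hg1 : ("status" = hd ∨ "status" ∈ tl)
        · simp [hg1] <;> try rfl
        ·
          by_cases hg2 : ("log" = hd ∨ "log" ∈ tl)
          · simp [hg1, hg2] <;> try rfl
          ·
            by_cases hg3 : ("history" = hd ∨ "history" ∈ tl)
            · simp [hg1, hg2, hg3] <;> try rfl
            ·
              by_cases hg4 : ("diff" = hd ∨ "diff" ∈ tl)
              · simp [hg1, hg2, hg3, hg4] <;> try rfl
              · simp [hg1, hg2, hg3, hg4] <;> try rfl
      · by_cases hp : (b == "ps") = true
        · simp only [hb, hg, hp, Bool.false_eq_true, if_false, if_true]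
          by_cases hp1 : PySem.Chars.isIn ['m', 'e', 'm', 'o', 'r', 'y'] j.toList = true
          · simp [hp1] <;> try rfl
          ·
            by_cases hp2 : PySem.Chars.isIn ['m', 'e', 'm'] j.toList = true
            · simp [hp1, hp2] <;> try rfl
            ·
              by_cases hp3 : PySem.Chars.isIn ['c', 'p', 'u'] j.toList = true
              · simp [hp1, hp2, hp3] <;> try rfl
              · simp [hp1, hp2, hp3] <;> try rfl
        · simp [hb, hg, hp]
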